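-- pv_equiv track=rewrite | github.com/Vania-Dev/posadasdecodigo | 03/03.py | best_joltage_subsequence
-- ===== SOURCE A (Python) =====
-- def best_joltage_subsequence(bank, k=12):
--     """
--     Devuelve la subsecuencia más grande posible de longitud k,
--     manteniendo el orden de los dígitos.
--     """
--     # Calcula cuántos dígitos necesitamos eliminar para llegar a k dígitos
--     digits_to_remove = len(bank) - k
--     stack = []
--
--     # Usa un algoritmo greedy con stack para encontrar la subsecuencia máxima
--     for digit in bank:
--         # Mientras podamos eliminar dígitos y el último en el stack sea menor al actual
--         while digits_to_remove > 0 and stack and stack[-1] < digit: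
--             stack.pop()  # Elimina el dígito menor
--             digits_to_remove -= 1
--         stack.append(digit)
--
--     # Asegura que la longitud final sea exactamente k
--     return "".join(stack[:k])
-- ===== SOURCE B (Python) =====
-- def best_joltage_subsequence(bank, k=12):
--     """Window-based greedy: each of the k output digits is the leftmost maximum
--     of the window that still leaves enough digits for the remaining slots."""
--     n = len(bank)
--     if k >= n:
--         return bank
--     if k <= 0:
--         return ""
--     res = []
--     start = 0
--     for kk in range(k, 0, -1):
--         end = n - kk + 1                       # window is bank[start:end]
--         best = bank.index(max(bank[start:end]), start)
--         res.append(bank[best])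
--         start = best + 1
--     return "".join(res)
-- ===== Notes on version B (the rewrite author's own statement) =====
-- stated objective: alternative
-- what changed: Replaced the monotonic pop-stack with a window-based greedy that, for each of the k output slots, scans the window bank[start : n-slots_left+1] for its leftmost maximum and advances start past it; early returns handle k >= len(bank) (whole string) and k <= 0 (empty).
-- intended difference: For negative k with more than -k suffix-maxima in bank, A returns a nonempty accidental fragment of its leftover non-increasing stack via the negative slice stack[:k], while B returns the empty string, which is intended since no subsequence of negative length exists. — e.g. on best_joltage_subsequence("ba", -1): A returns "b", B returns ""
import Mathlib
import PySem

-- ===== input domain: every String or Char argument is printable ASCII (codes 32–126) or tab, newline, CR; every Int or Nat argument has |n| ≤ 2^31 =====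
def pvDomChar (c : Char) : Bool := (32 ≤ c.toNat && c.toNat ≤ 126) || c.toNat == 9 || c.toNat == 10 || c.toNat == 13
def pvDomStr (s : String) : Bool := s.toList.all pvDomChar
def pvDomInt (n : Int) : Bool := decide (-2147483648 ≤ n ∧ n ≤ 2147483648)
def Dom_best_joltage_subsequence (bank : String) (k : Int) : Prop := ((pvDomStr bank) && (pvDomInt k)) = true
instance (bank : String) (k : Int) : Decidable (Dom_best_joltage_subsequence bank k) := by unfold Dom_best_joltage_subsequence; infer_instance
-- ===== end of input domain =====

-- B replaces A's monotonic pop-stack with a window-based greedy (leftmost maximum of each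
-- feasible window); for k < 0 B returns "" where A returns an accidental slice of its
-- leftover stack (stated as the intended difference D_ below).

-- ===== PORT A =====
-- the Python stack is kept top-at-head ('append' = cons, 'stack[-1]' = head, 'pop' = tail);
-- it is reversed back to Python order at the end.
def popA (stack : List Char) (r : Int) (d : Char) : List Char × Int :=
  match stack with
  | [] => ([], r)
  | top :: rest => if r > 0 ∧ top < d then popA rest (r - 1) d else (top :: rest, r)

def stepA (st : List Char × Int) (d : Char) : List Char × Int :=
  let p := popA st.1 st.2 d
  (d :: p.1, p.2)

def runA (st : List Char × Int) (xs : List Char) : List Char × Int :=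
  xs.foldl stepA st

def best_joltage_subsequence (bank : String) (k : Int) : String :=
  String.ofList
    (PySem.List.slice (runA ([], (bank.toList.length : Int) - k) bank.toList).1.reverse
      none (some k))

-- ===== PORT B =====
-- 'best = bank.index(max(bank[start:end]), start)': max over the window slice, then the first
-- occurrence of that character at or after start (exact here: the maximum occurs in the window,
-- so .index always finds it and never raises)
def scanBest (w : List Char) (start endi : Nat) : Nat :=
  let m := (PySem.List.max? (PySem.List.slice w (some (start : Int)) (some (endi : Int)))
    (fun c => c)).getD ' '
  start + (w.drop start).idxOf m

-- the while loop over the k slots; kk = slots still to fill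
def altLoop (w : List Char) (n : Nat) : Nat → Nat → List Char
  | _, 0 => []
  | start, kk + 1 =>
      let endi := n - kk            -- n - (kk+1) + 1
      let best := scanBest w start endi
      w.getD best ' ' :: altLoop w n (best + 1) kk

def best_joltage_subsequence_alt (bank : String) (k : Int) : String :=
  if (bank.toList.length : Int) ≤ k then bank
  else if k ≤ 0 then ""
  else String.ofList (altLoop bank.toList bank.toList.length 0 k.toNat)

-- ===== PRECONDITION & SPEC =====
-- number of suffix maxima of the input (an input-shape measure used only by D_)
def sklCount : List Char → Nat
  | [] => 0
  | x :: xs => (if xs.all (· ≤ x) then 1 else 0) + sklCount xs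

-- For negative k with more than -k suffix-maxima in bank, A returns a nonempty accidental
-- fragment of its leftover non-increasing stack via the negative slice stack[:k], while B
-- returns the empty string, which is intended since no subsequence of negative length exists.
def D_best_joltage_subsequence (bank : String) (k : Int) : Prop :=
  k < 0 ∧ -k < (sklCount bank.toList : Int)
instance (bank : String) (k : Int) : Decidable (D_best_joltage_subsequence bank k) := by
  unfold D_best_joltage_subsequence; infer_instance

def Spec_best_joltage_subsequence (bank : String) (k : Int) (out : String) : Prop :=
  ¬ D_best_joltage_subsequence bank k → out = best_joltage_subsequence_alt bank k
instance (bank : String) (k : Int) (out : String) : Decidable (Spec_best_joltage_subsequence bank k out) := by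
  unfold Spec_best_joltage_subsequence; infer_instance

def pvDiffWitness_best_joltage_subsequence : String × Int := ("ba", -1)
def pvDiffWitnessOut_best_joltage_subsequence : String × String := ("b", "")

-- ===== CLAIM (what is proved, stated in full; the proofs are below) =====
def Claim_unchanged_best_joltage_subsequence : Prop := ∀ (bank : String) (k : Int), Dom_best_joltage_subsequence bank k → Spec_best_joltage_subsequence bank k (best_joltage_subsequence bank k)
def Claim_changed_best_joltage_subsequence : Prop := Dom_best_joltage_subsequence (pvDiffWitness_best_joltage_subsequence.1) (pvDiffWitness_best_joltage_subsequence.2) ∧ D_best_joltage_subsequence (pvDiffWitness_best_joltage_subsequence.1) (pvDiffWitness_best_joltage_subsequence.2) ∧ best_joltage_subsequence (pvDiffWitness_best_joltage_subsequence.1) (pvDiffWitness_best_joltage_subsequence.2) = pvDiffWitnessOut_best_joltage_subsequence.1 ∧ best_joltage_subsequence_alt (pvDiffWitness_best_joltage_subsequence.1) (pvDiffWitness_best_joltage_subsequence.2) = pvDiffWitnessOut_best_joltage_subsequence.2 ∧ pvDiffWitnessOut_best_joltage_subsequence.1 ≠ pvDiffWitnessOut_best_joltage_subsequence.2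
def Claim_exact_best_joltage_subsequence : Prop := ∀ (bank : String) (k : Int), Dom_best_joltage_subsequence bank k → D_best_joltage_subsequence bank k → best_joltage_subsequence bank k ≠ best_joltage_subsequence_alt bank k

-- ===== LEMMAS AND PROOFS =====

-- budget/length/membership bookkeeping of one pop-while
theorem popA_budget (s : List Char) (r : Int) (d : Char) :
    (popA s r d).2 = r - s.length + (popA s r d).1.length ∧
    (popA s r d).2 ≤ r ∧ ∀ c ∈ (popA s r d).1, c ∈ s := by
  induction s generalizing r with
  | nil => simp [popA]
  | cons t rest ih =>
    simp only [popA]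
    split
    · obtain ⟨h1, h2, h3⟩ := ih (r - 1)
      refine ⟨by simp only [List.length_cons]; push_cast; omega, by omega, ?_⟩
      intro c hc; exact List.mem_cons_of_mem _ (h3 c hc)
    · exact ⟨by simp, le_refl r, fun c hc => hc⟩

-- r ≤ 0: nothing pops
theorem popA_nopop (s : List Char) (r : Int) (d : Char) (h : r ≤ 0) : popA s r d = (s, r) := by
  cases s with
  | nil => simp [popA]
  | cons t rest => simp only [popA]; rw [if_neg]; rintro ⟨h1, -⟩; omega

theorem runA_nopop (xs : List Char) (s : List Char) (r : Int) (h : r ≤ 0) :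
    runA (s, r) xs = (xs.reverse ++ s, r) := by
  induction xs generalizing s with
  | nil => simp [runA]
  | cons x xs ih =>
    simp only [runA, List.foldl_cons] at *
    rw [show stepA (s, r) x = (x :: s, r) by simp [stepA, popA_nopop _ _ _ h]]
    rw [ih (x :: s)]
    simp

-- all of s is smaller than d and the budget suffices: the stack drains completely
theorem popA_drain (s : List Char) (r : Int) (d : Char)
    (hlt : ∀ c ∈ s, c < d) (hr : (s.length : Int) ≤ r) :
    popA s r d = ([], r - s.length) := by
  induction s generalizing r with
  | nil => simp [popA]
  | cons t rest ih =>
    simp only [popA]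
    rw [if_pos ⟨by simp only [List.length_cons] at hr; push_cast at hr; omega, hlt t (by simp)⟩]
    rw [ih (r - 1) (fun c hc => hlt c (List.mem_cons_of_mem _ hc))
        (by simp only [List.length_cons] at hr; push_cast at hr ⊢; omega)]
    simp only [List.length_cons, Prod.mk.injEq, true_and]
    push_cast; omega

theorem runA_bookkeeping (xs : List Char) (s : List Char) (r : Int) :
    (runA (s, r) xs).2 = r - (s.length + xs.length) + (runA (s, r) xs).1.length ∧
    (runA (s, r) xs).2 ≤ r ∧ ∀ c ∈ (runA (s, r) xs).1, c ∈ s ∨ c ∈ xs := by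
  induction xs generalizing s r with
  | nil => simp [runA]
  | cons x xs ih =>
    simp only [runA, List.foldl_cons] at *
    obtain ⟨p1, p2, p3⟩ := popA_budget s r x
    have hstep : stepA (s, r) x = (x :: (popA s r x).1, (popA s r x).2) := by simp [stepA]
    rw [hstep]
    obtain ⟨q1, q2, q3⟩ := ih (x :: (popA s r x).1) (popA s r x).2
    refine ⟨by rw [q1]; simp; omega, le_trans q2 p2, ?_⟩
    intro c hc
    rcases q3 c hc with h | h
    · rcases List.mem_cons.mp h with h | h
      · right; simp [h]
      · left; exact p3 c h
    · right; simp [h]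

-- a bottom element m that the current character cannot pop stays put
theorem popA_barrier (s : List Char) (r : Int) (d m : Char)
    (hside : ¬((popA s r d).1 = [] ∧ 0 < (popA s r d).2 ∧ m < d)) :
    popA (s ++ [m]) r d = ((popA s r d).1 ++ [m], (popA s r d).2) := by
  induction s generalizing r with
  | nil =>
    have h : popA ([] : List Char) r d = ([], r) := rfl
    rw [h] at hside
    simp only [List.nil_append, popA]
    rw [if_neg]
    rintro ⟨h1, h2⟩
    exact hside ⟨rfl, h1, h2⟩
  | cons t rest ih =>
    rw [List.cons_append]
    by_cases hc : r > 0 ∧ t < d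
    · have h1 : popA (t :: rest) r d = popA rest (r - 1) d := by
        simp only [popA]; rw [if_pos hc]
      have h2 : popA (t :: (rest ++ [m])) r d = popA (rest ++ [m]) (r - 1) d := by
        simp only [popA]; rw [if_pos hc]
      rw [h1] at hside ⊢
      rw [h2]
      exact ih (r - 1) hside
    · have h1 : popA (t :: rest) r d = (t :: rest, r) := by
        simp only [popA]; rw [if_neg hc]
      have h2 : popA (t :: (rest ++ [m])) r d = (t :: (rest ++ [m]), r) := by
        simp only [popA]; rw [if_neg hc]
      rw [h1, h2]
      simp

-- the barrier lemma for a whole run: if every character that arrives while the budget could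
-- still reach m is ≤ m, then m is never popped
theorem runA_barrier (m : Char) :
    ∀ (xs s : List Char) (r : Int),
      (∀ (t : Nat), (t : Int) < r - s.length → ∀ (ht : t < xs.length), xs[t] ≤ m) →
      runA (s ++ [m], r) xs = ((runA (s, r) xs).1 ++ [m], (runA (s, r) xs).2) := by
  intro xs
  induction xs with
  | nil => intro s r _; simp [runA]
  | cons x xs ih =>
    intro s r hyp
    simp only [runA, List.foldl_cons] at *
    obtain ⟨p1, p2, p3⟩ := popA_budget s r x
    have hside : ¬((popA s r x).1 = [] ∧ 0 < (popA s r x).2 ∧ m < x) := by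
      rintro ⟨h1, h2, h3⟩
      rw [h1] at p1; simp at p1
      have h0 : ((0 : Nat) : Int) < r - s.length := by omega
      exact absurd (hyp 0 h0 (by simp)) (by simpa using not_le.mpr h3)
    have hstepm : stepA (s ++ [m], r) x = ((x :: (popA s r x).1) ++ [m], (popA s r x).2) := by
      simp [stepA, popA_barrier s r x m hside]
    have hstep : stepA (s, r) x = (x :: (popA s r x).1, (popA s r x).2) := by simp [stepA]
    rw [hstepm, hstep]
    apply ih
    intro t ht htl
    have := hyp (t + 1) (by simp at ht ⊢; omega) (by simpa using Nat.succ_lt_succ htl)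
    simpa using this

-- processing u ++ [m] where everything in u is < m leaves exactly [m] on the stack
theorem runA_drain_prefix (u : List Char) (m : Char) (r : Int)
    (hlt : ∀ c ∈ u, c < m) (hr : (u.length : Int) ≤ r) :
    runA ([], r) (u ++ [m]) = ([m], r - u.length) := by
  have hfold : runA ([], r) (u ++ [m]) = stepA (runA ([], r) u) m := by
    simp [runA, List.foldl_append]
  rw [hfold]
  obtain ⟨q1, q2, q3⟩ := runA_bookkeeping u [] r
  set st := (runA (([] : List Char), r) u).1 with hst
  set r2 := (runA (([] : List Char), r) u).2 with hr2
  have hmem : ∀ c ∈ st, c < m := by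
    intro c hc
    rcases q3 c hc with h | h
    · simp at h
    · exact hlt c h
  have hlen : (st.length : Int) ≤ r2 := by simp at q1; omega
  have : stepA (st, r2) m = ([m], r2 - st.length) := by
    simp [stepA, popA_drain st r2 m hmem hlen]
  rw [show (runA (([] : List Char), r) u) = (st, r2) from rfl, this]
  simp at q1
  congr 1
  omega

-- the inner scan returns the leftmost maximum of the window
theorem scanBest_spec (w : List Char) (start endi : Nat) (h1 : start < endi) (h2 : endi ≤ w.length) :
    start ≤ scanBest w start endi ∧ scanBest w start endi < endi ∧
    (∀ i, start ≤ i → i < endi → w.getD i ' ' ≤ w.getD (scanBest w start endi) ' ') ∧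
    (∀ i, start ≤ i → i < endi → i < scanBest w start endi →
      w.getD i ' ' < w.getD (scanBest w start endi) ' ') := by
  have hslice : PySem.List.slice w (some (start : Int)) (some (endi : Int)) =
      (w.drop start).take (endi - start) := PySem.List.slice_natCast ..
  set win := (w.drop start).take (endi - start) with hwin
  have hwlen : win.length = endi - start := by
    rw [hwin, List.length_take]
    simp
    omega
  have hne : win ≠ [] := by
    intro h
    have := congrArg List.length h
    rw [hwlen] at this
    simp at this
    omega
  obtain ⟨m, hm⟩ : ∃ m, PySem.List.max? win (fun c => c) = some m := by
    cases hmm : PySem.List.max? win (fun c => c) with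
    | none => exact absurd ((PySem.List.max?_eq_none_iff win (fun c => c)).mp hmm) hne
    | some m => exact ⟨m, rfl⟩
  have hmmax : ∀ y ∈ win, y ≤ m := by
    have := PySem.List.max?_isMax hm
    simpa using this
  have hmmem : m ∈ win := PySem.List.max?_mem hm
  have hsb : scanBest w start endi = start + (w.drop start).idxOf m := by
    unfold scanBest
    rw [hslice, hm]
    rfl
  have hmds : m ∈ w.drop start := List.mem_of_mem_take hmmem
  have hjlt : (w.drop start).idxOf m < (w.drop start).length := List.idxOf_lt_length_of_mem hmds
  have hdlen : (w.drop start).length = w.length - start := by simp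
  set j := (w.drop start).idxOf m with hj
  have hjget : (w.drop start)[j]'hjlt = m := List.getElem_idxOf _
  obtain ⟨p, hp, hpm⟩ := List.mem_iff_getElem.mp hmmem
  have hptake : win[p]'hp = (w.drop start)[p]'(by rw [hdlen]; rw [hwlen] at hp; omega) :=
    List.getElem_take
  have hple : j ≤ p := by
    by_contra hc
    have hlt : p < (w.drop start).idxOf m := by omega
    have hne' := List.not_of_lt_findIdx (p := (· == m)) (xs := w.drop start)
      (by simpa [List.idxOf] using hlt)
    have hval : (w.drop start)[p]'(by rw [hdlen]; rw [hwlen] at hp; omega) = m :=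
      hptake.symm.trans hpm
    exact absurd hval (by simpa using hne')
  have hjwin : j < endi - start := by
    rw [hwlen] at hp
    omega
  have hconv : ∀ (t : Nat) (ht : t < w.length - start),
      w.getD (start + t) ' ' = (w.drop start)[t]'(by rw [hdlen]; omega) := by
    intro t ht
    rw [List.getD_eq_getElem w ' ' (by omega)]
    exact List.getElem_drop.symm
  have hwinval : ∀ (t : Nat) (ht : t < endi - start),
      (w.drop start)[t]'(by rw [hdlen]; omega) ≤ m := by
    intro t ht
    have h4 : win[t]'(by omega) = (w.drop start)[t]'(by rw [hdlen]; omega) := List.getElem_take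
    rw [← h4]
    exact hmmax _ (List.getElem_mem _)
  refine ⟨by rw [hsb]; omega, by rw [hsb]; omega, ?_, ?_⟩
  · intro i hi1 hi2
    obtain ⟨t, rfl⟩ : ∃ t, i = start + t := ⟨i - start, by omega⟩
    rw [hsb, hconv t (by omega), hconv j (by rw [← hdlen]; omega), hjget]
    exact hwinval t (by omega)
  · intro i hi1 hi2 hi3
    obtain ⟨t, rfl⟩ : ∃ t, i = start + t := ⟨i - start, by omega⟩
    rw [hsb] at hi3
    have htj : t < j := by omega
    rw [hsb, hconv t (by omega), hconv j (by rw [← hdlen]; omega), hjget]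
    have hneq : (w.drop start)[t]'(by rw [hdlen]; omega) ≠ m := by
      have htj' : t < (w.drop start).idxOf m := by rw [← hj]; exact htj
      have := List.not_of_lt_findIdx (p := (· == m)) (xs := w.drop start)
        (by simpa [List.idxOf] using htj')
      simpa using this
    exact lt_of_le_of_ne (hwinval t (by omega)) hneq

-- main correspondence: the truncated stack equals the window-greedy selection
theorem mainA (w : List Char) :
    ∀ (kk start : Nat), start + kk ≤ w.length →
      ((runA ([], ((w.length - start - kk : Nat) : Int)) (w.drop start)).1.reverse).take kk =
        altLoop w w.length start kk := by
  intro kk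
  induction kk with
  | zero => intro start _; simp [altLoop]
  | succ kk ih =>
    intro start h
    set n := w.length with hn
    have h1 : start < n - kk := by omega
    have h2 : n - kk ≤ n := by omega
    obtain ⟨hj1, hj2, hj3, hj4⟩ := scanBest_spec w start (n - kk) h1 h2
    set j := scanBest w start (n - kk) with hjdef
    have hjn : j < n := by omega
    set m := w.getD j ' ' with hm
    have hmj : m = w[j] := List.getD_eq_getElem w ' ' hjn
    set u := (w.drop start).take (j - start) with hu
    set v := w.drop (j + 1) with hv
    have hulen : u.length = j - start := by
      rw [hu, List.length_take, List.length_drop]; omega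
    have hvlen : v.length = n - (j + 1) := by rw [hv, List.length_drop]
    have e2 : (w.drop start).drop (j - start) = w.drop j := by
      rw [List.drop_drop]
      congr 1
      omega
    have e3 : w.drop j = w[j] :: w.drop (j + 1) := List.drop_eq_getElem_cons hjn
    have hdecomp : w.drop start = u ++ ([m] ++ v) :=
      calc w.drop start = u ++ (w.drop start).drop (j - start) := (List.take_append_drop _ _).symm
        _ = u ++ w.drop j := by rw [e2]
        _ = u ++ ([m] ++ v) := by rw [e3, hmj]; rfl
    have hR : ((n - start - (kk + 1) : Nat) : Int) = (n : Int) - start - kk - 1 := by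
      push_cast [Nat.cast_sub]; omega
    set R : Int := ((n - start - (kk + 1) : Nat) : Int) with hRdef
    -- elements of u are strictly below m
    have hult : ∀ c ∈ u, c < m := by
      intro c hc
      obtain ⟨t, ht, hct⟩ := List.mem_iff_getElem.mp hc
      have htl : t < j - start := by rw [hulen] at ht; omega
      have hc2 : c = w[start + t]'(by omega) := by
        rw [← hct]
        simp only [hu, List.getElem_take, List.getElem_drop]
      have := hj4 (start + t) (by omega) (by omega) (by omega)
      rw [List.getD_eq_getElem w ' ' (by omega : start + t < n)] at this
      rw [hc2]
      exact this
    have hulenR : (u.length : Int) ≤ R := by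
      rw [hulen, hR]; push_cast; omega
    have hsplit : runA ([], R) (w.drop start) = runA (runA ([], R) (u ++ [m])) v := by
      rw [hdecomp, ← List.append_assoc]
      simp [runA, List.foldl_append]
    have hdrain : runA ([], R) (u ++ [m]) = ([m], R - u.length) := runA_drain_prefix u m R hult hulenR
    have hR' : R - u.length = ((n - (j + 1) - kk : Nat) : Int) := by
      rw [hulen, hR]; push_cast; omega
    have hbar : runA ([m], R - u.length) v =
        ((runA ([], R - u.length) v).1 ++ [m], (runA ([], R - u.length) v).2) := by
      have := runA_barrier m v [] (R - u.length) ?_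
      · simpa using this
      · intro t ht htl
        have hidx : j + 1 + t < n - kk := by
          rw [hulen, hR] at ht
          simp only [List.length_nil, Nat.cast_zero, sub_zero] at ht
          push_cast at ht
          omega
        have hle := hj3 (j + 1 + t) (by omega) hidx
        rw [List.getD_eq_getElem w ' ' (by omega : j + 1 + t < n)] at hle
        calc v[t]'htl = w[j + 1 + t]'(by omega) := by
              simp only [hv, List.getElem_drop]
          _ ≤ m := hle
    rw [hsplit, hdrain, hbar]
    have hihl : j + 1 + kk ≤ n := by omega
    have hihr := ih (j + 1) hihl
    rw [← hR'] at hihr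
    show ((runA ([], R - u.length) v).1 ++ [m]).reverse.take (kk + 1) = altLoop w n start (kk + 1)
    rw [List.reverse_append]
    simp only [List.reverse_cons, List.reverse_nil, List.nil_append, List.singleton_append,
      List.take_succ_cons]
    rw [show altLoop w n start (kk + 1) = m :: altLoop w n (j + 1) kk from rfl]
    rw [hihr]

-- with an inexhaustible budget the stack is exactly the suffix-maxima list
theorem skl_append_small (x y : Char) (hxy : x < y) :
    ∀ (p q : List Char), (∀ c ∈ p, c ≤ x) → sklCount (p ++ y :: q) = sklCount (y :: q) := by
  intro p
  induction p with
  | nil => intro q _; rfl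
  | cons c p' ih =>
    intro q hp
    have hcx : c ≤ x := hp c (by simp)
    have hall : ((p' ++ y :: q).all (· ≤ c)) = false := by
      rw [List.all_eq_false]
      refine ⟨y, by simp, ?_⟩
      simp only [decide_eq_true_eq]
      exact not_le.mpr (lt_of_le_of_lt hcx hxy)
    show (if (p' ++ y :: q).all (· ≤ c) then 1 else 0) + sklCount (p' ++ y :: q) = _
    rw [hall, ih q (fun d hd => hp d (List.mem_cons_of_mem _ hd))]
    simp

theorem dropWhile_cons_false {p : Char → Bool} :
    ∀ (l : List Char) (y : Char) (q : List Char), l.dropWhile p = y :: q → p y = false := by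
  intro l
  induction l with
  | nil => intro y q h; simp at h
  | cons a l ih =>
    intro y q h
    rw [List.dropWhile_cons] at h
    split at h
    · exact ih y q h
    · rename_i hpa
      cases h
      simpa using hpa

theorem runA_pure_length :
    ∀ (w : List Char) (r : Int), (w.length : Int) < r →
      (runA ([], r) w).1.length = sklCount w := by
  have H : ∀ (N : Nat) (w : List Char), w.length ≤ N → ∀ (r : Int), (w.length : Int) < r →
      (runA ([], r) w).1.length = sklCount w := by
    intro N
    induction N with
    | zero =>
      intro w hw r hr
      have hwnil : w = [] := by
        cases w with
        | nil => rfl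
        | cons a b => simp at hw
      subst hwnil; rfl
    | succ N ihN =>
      intro w hw r hr
      match w with
      | [] => rfl
      | x :: v =>
        have hstep : runA ([], r) (x :: v) = runA ([x], r) v := by
          simp [runA, stepA, popA]
        by_cases hall : v.all (· ≤ x)
        · have hbar := runA_barrier x v [] r (by
            intro t _ htl
            have : v[t] ∈ v := List.getElem_mem htl
            exact of_decide_eq_true (List.all_eq_true.mp hall _ this))
          simp only [List.nil_append] at hbar
          rw [hstep, hbar]
          have hlenv : (runA ([], r) v).1.length = sklCount v := by
            apply ihN v (by simp at hw; omega) r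
            simp at hr ⊢; omega
          simp only [List.length_append, List.length_cons, List.length_nil, hlenv]
          show _ = (if v.all (· ≤ x) then 1 else 0) + sklCount v
          rw [if_pos hall]
          omega
        · -- v = p ++ y :: q with p = takeWhile, x < y
          have hallf : v.all (· ≤ x) = false := by
            simpa using hall
          obtain ⟨p, hpdef⟩ : ∃ p, p = v.takeWhile (· ≤ x) := ⟨_, rfl⟩
          have hne : v.dropWhile (· ≤ x) ≠ [] := by
            intro he
            have hv : v.takeWhile (· ≤ x) = v := by
              have := List.takeWhile_append_dropWhile (p := (· ≤ x)) (l := v)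
              rw [he, List.append_nil] at this
              exact this
            apply absurd hallf
            rw [Bool.not_eq_false, List.all_eq_true]
            intro c hc
            rw [← hv] at hc
            exact List.mem_takeWhile_imp (p := fun c => decide (c ≤ x)) hc
          obtain ⟨y, q, hyq⟩ : ∃ y q, v.dropWhile (· ≤ x) = y :: q := by
            match hd : v.dropWhile (· ≤ x) with
            | [] => exact absurd hd hne
            | y :: q => exact ⟨y, q, rfl⟩
          have hxy : x < y := by
            have h2' := dropWhile_cons_false v y q hyq
            exact not_le.mp (of_decide_eq_false h2')
          have hvpq : v = p ++ y :: q := by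
            rw [hpdef, ← hyq]
            exact (List.takeWhile_append_dropWhile ..).symm
          have hple : ∀ c ∈ p, c ≤ x := by
            intro c hc
            rw [hpdef] at hc
            simpa using List.mem_takeWhile_imp hc
          have hwlen : (x :: v).length = p.length + q.length + 2 := by
            rw [hvpq]; simp; omega
          have hrlen : (p.length : Int) + q.length + 2 < r := by
            rw [hwlen] at hr; push_cast at hr; omega
          -- run over p keeps x at the bottom
          have hbarp := runA_barrier x p [] r (by
            intro t _ htl
            exact hple _ (List.getElem_mem htl))
          simp only [List.nil_append] at hbarp
          obtain ⟨b1, b2, b3⟩ := runA_bookkeeping p [] r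
          rcases hL : runA ((([] : List Char)), r) p with ⟨sp, r2⟩
          rw [hL] at b1 b2 b3 hbarp
          simp only [List.length_nil, Nat.cast_zero, zero_add] at b1
          have hsple : ∀ c ∈ sp, c < y := by
            intro c hc
            rcases b3 c hc with h | h
            · simp at h
            · exact lt_of_le_of_lt (hple c h) hxy
          have hr2 : (sp.length + 1 : Int) ≤ r2 := by omega
          have hdrainy : stepA (sp ++ [x], r2) y = ([y], r2 - (sp.length + 1)) := by
            simp only [stepA]
            have hpop := popA_drain (sp ++ [x]) r2 y
              (by intro c hc
                  rcases List.mem_append.mp hc with h | h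
                  · exact hsple c h
                  · simp at h; rw [h]; exact hxy)
              (by simpa using hr2)
            rw [hpop, show ((sp ++ [x]).length : Int) = (sp.length : Int) + 1 from by simp]
          have hchain : runA ([], r) (x :: v) = runA ([], r2 - (sp.length + 1)) (y :: q) := by
            rw [hstep, hvpq]
            have e1 : runA ([x], r) (p ++ y :: q) = runA (runA ([x], r) p) (y :: q) := by
              simp [runA, List.foldl_append]
            rw [e1, hbarp]
            have e2 : runA (sp ++ [x], r2) (y :: q) = runA (stepA (sp ++ [x], r2) y) q := rfl
            rw [e2, hdrainy]
            simp [runA, stepA, popA]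
          rw [hchain]
          have hlen2 : (runA ([], r2 - (sp.length + 1)) (y :: q)).1.length = sklCount (y :: q) := by
            apply ihN (y :: q) (by rw [hwlen] at hw; simp; omega)
            simp only [List.length_cons]
            push_cast
            omega
          rw [hlen2]
          show sklCount (y :: q) = (if v.all (· ≤ x) then 1 else 0) + sklCount v
          rw [if_neg (by simp [hallf]), hvpq]
          simp [skl_append_small x y hxy p q hple]
  intro w r hr
  exact H w.length w (le_refl _) r hr

theorem unchanged : ∀ (bank : String) (k : Int),
    ¬ D_best_joltage_subsequence bank k →
    best_joltage_subsequence bank k = best_joltage_subsequence_alt bank k := by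
  intro bank k hD
  unfold best_joltage_subsequence best_joltage_subsequence_alt
  rcases lt_trichotomy k 0 with hk | hk | hk
  · -- k < 0 : A's stack is the suffix-maxima list, the negative slice empties it
    have hnD : (sklCount bank.toList : Int) ≤ -k := by
      unfold D_best_joltage_subsequence at hD
      exact not_lt.mp fun hlt => hD ⟨hk, hlt⟩
    have hbig : (bank.toList.length : Int) < (bank.toList.length : Int) - k := by omega
    have hlen := runA_pure_length bank.toList ((bank.toList.length : Int) - k) hbig
    have hkneg : k = -(((-k).toNat : Nat) : Int) := by omega
    have h0 : 0 < (-k).toNat := by omega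
    rw [if_neg (by omega), if_pos (le_of_lt hk)]
    rw [hkneg, PySem.List.slice_to_neg_natCast _ _ h0]
    have hnil : (runA ([], (bank.toList.length : Int) - -(((-k).toNat : Nat) : Int))
        bank.toList).1.reverse.take
        ((runA ([], (bank.toList.length : Int) - -(((-k).toNat : Nat) : Int))
          bank.toList).1.reverse.length - (-k).toNat) = [] := by
      apply List.take_eq_nil_iff.mpr
      left
      rw [← hkneg]
      simp only [List.length_reverse]
      omega
    rw [hnil]
  · -- k = 0
    subst hk
    rw [PySem.List.slice_to _ (le_refl 0)]
    by_cases hn : (bank.toList.length : Int) ≤ 0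
    · have hbe : bank = "" := by
        have h0 : bank.toList = [] := List.length_eq_zero_iff.mp (by omega)
        rw [← @String.ofList_toList bank, h0]
      rw [if_pos hn]
      conv_rhs => rw [hbe]
      rfl
    · rw [if_neg hn, if_pos (le_refl 0)]
      rfl
  · -- 0 < k
    by_cases hkn : (bank.toList.length : Int) ≤ k
    · -- k ≥ n : nothing is removed, the whole string is returned
      rw [if_pos hkn]
      rw [runA_nopop bank.toList [] _ (by omega)]
      simp only [List.append_nil, List.reverse_reverse]
      rw [PySem.List.slice_to _ (by omega : (0:Int) ≤ k)]
      rw [List.take_of_length_le (by omega : bank.toList.length ≤ k.toNat)]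
      exact String.ofList_toList
    · -- 0 < k < n : main correspondence
      rw [if_neg hkn, if_neg (by omega)]
      have hle : 0 + k.toNat ≤ bank.toList.length := by omega
      have hmain := mainA bank.toList k.toNat 0 hle
      rw [List.drop_zero] at hmain
      rw [PySem.List.slice_to _ (by omega : (0:Int) ≤ k)]
      rw [show ((bank.toList.length : Int) - k) = ((bank.toList.length - 0 - k.toNat : Nat) : Int) by push_cast; omega]
      rw [hmain]

-- ===== VERDICT (by name: the statement is the Claim_ definition above) =====
theorem best_joltage_subsequence_spec : Claim_unchanged_best_joltage_subsequence := by
  intro bank k _ hD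
  exact unchanged bank k hD

theorem best_joltage_subsequence_changed : Claim_changed_best_joltage_subsequence := by
  unfold Claim_changed_best_joltage_subsequence; decide

theorem best_joltage_subsequence_tight : Claim_exact_best_joltage_subsequence := by
  unfold Claim_exact_best_joltage_subsequence
  intro bank k _ hD
  obtain ⟨hk, hskl⟩ := hD
  have hbig : (bank.toList.length : Int) < (bank.toList.length : Int) - k := by omega
  have hlen := runA_pure_length bank.toList ((bank.toList.length : Int) - k) hbig
  have h0 : 0 < (-k).toNat := by omega
  have hkneg : k = -(((-k).toNat : Nat) : Int) := by omega
  intro heq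
  unfold best_joltage_subsequence best_joltage_subsequence_alt at heq
  rw [if_neg (by omega : ¬((bank.toList.length : Int) ≤ k)), if_pos (le_of_lt hk)] at heq
  rw [hkneg, PySem.List.slice_to_neg_natCast _ _ h0] at heq
  rw [hkneg] at hlen
  have htl := congrArg String.toList heq
  rw [String.toList_ofList] at htl
  have hlength := congrArg List.length htl
  simp only [List.length_take, List.length_reverse] at hlength
  rw [hlen] at hlength
  have hempt : ("" : String).toList = [] := rfl
  rw [hempt] at hlength
  simp only [List.length_nil] at hlength
  omega
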